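-- pv_equiv track=rewrite | github.com/eunchaeee/coding-test | 프로그래머스/2/60058. 괄호 변환/괄호 변환.py | solution
-- ===== SOURCE A (Python) =====
-- def right_letters(p):
--     check = 0
--     for i in range(len(p)):
--         if check < 0:
--             return False
--         if p[i] == '(':
--             check += 1
--         else:
--             check -= 1
--     return True
--
-- def solution(p):
--     if p == "":
--         return p
--
--     # p를 u, v로 분리하기
--     l_count = 0
--     r_count = 0
--     u = ''
--     v = ''
--     for i in range(len(p)):
--         if l_count == r_count and l_count != 0:
--             v = p[i:]
--             break
--         if p[i] == '(':
--             l_count += 1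
--             u += p[i]
--         else:
--             r_count += 1
--             u += p[i]
--
--     if right_letters(u):
--         return u + solution(v)
--     else:
--         tu = ""
--         if len(u) > 2:
--             for i in u[1:-1]:
--                 if i == '(':
--                     tu += ')'
--                 else:
--                     tu += '('
--         return '(' + solution(v) + ')' + tu
-- ===== SOURCE B (Python) =====
-- def _split(s):
--     bal = 0
--     for j, c in enumerate(s):
--         bal += 1 if c == '(' else -1
--         if bal == 0:
--             return s[:j + 1], s[j + 1:]
--     return s, ''
--
-- def _ok(u):
--     # balanced-prefix check over all proper prefixes (same quirk as A: the
--     # counter after the final character is never inspected)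
--     bal = 0
--     for c in u[:-1]:
--         bal += 1 if c == '(' else -1
--         if bal < 0:
--             return False
--     return True
--
-- def _flip(s):
--     return ''.join(')' if c == '(' else '(' for c in s)
--
-- def solution(p):
--     lefts, rights = [], []
--     cur = p
--     while cur:
--         u, v = _split(cur)
--         if _ok(u):
--             lefts.append(u)
--             rights.append('')
--         else:
--             lefts.append('(')
--             rights.append(')' + _flip(u[1:-1]))
--         cur = v
--     return ''.join(lefts) + ''.join(reversed(rights))
-- ===== Notes on version B (the rewrite author's own statement) =====
-- stated objective: alternative
-- what changed: Replaces A's recursion, which wraps each recursive result between an opening piece and a closing-plus-flipped-tail piece, by an explicit while-loop that repeatedly splits off the shortest balanced prefix, accumulating the left pieces and the right pieces in two lists and joining the lefts followed by the reversed rights at the end; the split and the balance check are single balance-counter scans instead of A's two-counter loop with string concatenation.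
import Mathlib
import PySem

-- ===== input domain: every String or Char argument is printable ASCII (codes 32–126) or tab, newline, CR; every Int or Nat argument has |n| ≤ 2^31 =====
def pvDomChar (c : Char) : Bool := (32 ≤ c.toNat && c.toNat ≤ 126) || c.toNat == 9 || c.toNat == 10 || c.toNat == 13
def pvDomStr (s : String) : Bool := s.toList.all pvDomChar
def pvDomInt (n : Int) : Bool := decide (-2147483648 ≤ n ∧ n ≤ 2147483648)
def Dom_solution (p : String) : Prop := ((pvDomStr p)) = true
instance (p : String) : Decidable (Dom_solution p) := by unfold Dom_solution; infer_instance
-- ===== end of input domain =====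

-- B replaces A's recursive wrap-around construction by an iterative prefix-splitting
-- loop with two accumulator lists (lefts, reversed rights); equal cost, different shape.

-- ===== PORT A =====

-- right_letters(p), with `check` the counter (tested BEFORE each character, as in A)
def rlA : List Char → Int → Bool
  | [], _ => true
  | c :: cs, check =>
    if check < 0 then false
    else rlA cs (if c = '(' then check + 1 else check - 1)

-- A's u/v-splitting loop; `u` is the accumulated prefix; p[i:] is `c :: cs` (i ≥ 0, exact)
def splitA : List Char → Nat → Nat → List Char → List Char × List Char
  | [], _, _, u => (u, [])
  | c :: cs, l, r, u =>
    if l = r ∧ l ≠ 0 then (u, c :: cs)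
    else if c = '(' then splitA cs (l + 1) r (u ++ [c])
    else splitA cs l (r + 1) (u ++ [c])

-- A's tu-building loop over u[1:-1]
def flipA : List Char → List Char → List Char
  | [], tu => tu
  | c :: cs, tu => flipA cs (tu ++ [if c = '(' then ')' else '('])

theorem splitA_snd_le : ∀ (cs : List Char) (l r : Nat) (u : List Char),
    (splitA cs l r u).2.length ≤ cs.length := by
  intro cs
  induction cs with
  | nil => intro l r u; simp [splitA]
  | cons c cs ih =>
    intro l r u
    simp only [splitA]
    split
    · simp
    · split <;> exact Nat.le_succ_of_le (ih _ _ _)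

theorem splitA_snd_lt (c : Char) (cs : List Char) :
    (splitA (c :: cs) 0 0 []).2.length < (c :: cs).length := by
  simp only [splitA]
  split <;> [skip; split] <;>
    first
      | (exact Nat.lt_succ_of_le (splitA_snd_le _ _ _ _))
      | simp_all

-- A's solution on List Char (the empty-string early return is the `p = []` branch);
-- u[1:-1] is exactly (u.drop 1).dropLast
def solA (p : List Char) : List Char :=
  if _hp : p = [] then p
  else
    let uv := splitA p 0 0 []
    if rlA uv.1 0 then uv.1 ++ solA uv.2
    else
      let tu := if uv.1.length > 2 then flipA ((uv.1.drop 1).dropLast) [] else []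
      '(' :: (solA uv.2 ++ ')' :: tu)
termination_by p.length
decreasing_by
  all_goals
    cases p with
    | nil => exact absurd rfl _hp
    | cons c cs => exact splitA_snd_lt c cs

def solution (p : String) : String := String.mk (solA p.toList)

-- ===== PORT B =====

-- _split's for-loop: `pre` is s[:j], `rest` is s[j:], `bal` the counter
def splitBgo : List Char → List Char → Int → List Char × List Char
  | pre, [], _ => (pre, [])
  | pre, c :: rs, bal =>
    let b := bal + (if c = '(' then 1 else -1)
    if b = 0 then (pre ++ [c], rs) else splitBgo (pre ++ [c]) rs b

def splitB (s : List Char) : List Char × List Char := splitBgo [] s 0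

-- _ok's loop over u[:-1]
def okgo : List Char → Int → Bool
  | [], _ => true
  | c :: cs, bal =>
    let b := bal + (if c = '(' then 1 else -1)
    if b < 0 then false else okgo cs b

def okB (u : List Char) : Bool := okgo u.dropLast 0

def flipB (s : List Char) : List Char := s.map (fun c => if c = '(' then ')' else '(')

theorem splitBgo_snd_le : ∀ (rest pre : List Char) (bal : Int),
    (splitBgo pre rest bal).2.length ≤ rest.length := by
  intro rest
  induction rest with
  | nil => intro pre bal; simp [splitBgo]
  | cons c rs ih =>
    intro pre bal
    have he : splitBgo pre (c :: rs) bal =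
        if (bal + (if c = '(' then (1 : Int) else -1)) = 0 then (pre ++ [c], rs)
        else splitBgo (pre ++ [c]) rs (bal + (if c = '(' then 1 else -1)) := rfl
    rw [he]
    split <;>
      (split
       · simp
       · exact Nat.le_succ_of_le (ih _ _))

theorem splitB_snd_lt (c : Char) (cs : List Char) :
    (splitB (c :: cs)).2.length < (c :: cs).length := by
  show (splitBgo [] (c :: cs) 0).2.length < (c :: cs).length
  have he : splitBgo [] (c :: cs) 0 =
      if ((0 : Int) + (if c = '(' then 1 else -1)) = 0 then ([c], cs)
      else splitBgo [c] cs ((0 : Int) + (if c = '(' then 1 else -1)) := rfl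
  rw [he]
  split <;>
    (split
     · simp
     · exact Nat.lt_succ_of_le (splitBgo_snd_le _ _ _))

-- B's while-loop, with the two accumulator lists
def loopB (cur : List Char) (lefts rights : List (List Char)) : List Char :=
  if _hc : cur = [] then lefts.flatten ++ rights.reverse.flatten
  else
    let uv := splitB cur
    if okB uv.1 then loopB uv.2 (lefts ++ [uv.1]) (rights ++ [[]])
    else loopB uv.2 (lefts ++ [['(']]) (rights ++ [')' :: flipB ((uv.1.drop 1).dropLast)])
termination_by cur.length
decreasing_by
  all_goals
    cases cur with
    | nil => exact absurd rfl _hc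
    | cons c cs => exact splitB_snd_lt c cs

def solution_alt (p : String) : String := String.mk (loopB p.toList [] [])

-- ===== PRECONDITION & SPEC =====
def Spec_solution (p : String) (out : String) : Prop := out = solution_alt p
instance (p : String) (out : String) : Decidable (Spec_solution p out) := by unfold Spec_solution; infer_instance

-- ===== CLAIM (what is proved, stated in full; the proofs are below) =====
def Claim_equal_solution : Prop := ∀ (p : String), Dom_solution p → Spec_solution p (solution p)

-- ===== LEMMAS AND PROOFS =====

theorem split_agree : ∀ (cs : List Char) (l r : Nat) (u : List Char), 1 ≤ l + r →
    splitA cs l r u = if (l : Int) - r = 0 then (u, cs) else splitBgo u cs ((l : Int) - r) := by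
  intro cs
  induction cs with
  | nil =>
    intro l r u _
    simp only [splitA]
    split <;> rfl
  | cons c cs ih =>
    intro l r u hlr
    by_cases hb : (l : Int) - r = 0
    · have hl : l = r := by omega
      have hln : l ≠ 0 := by omega
      simp only [splitA]
      rw [if_pos ⟨hl, hln⟩, if_pos hb]
    · have hcond : ¬ (l = r ∧ l ≠ 0) := by
        rintro ⟨h1, _⟩
        omega
      simp only [splitA]
      rw [if_neg hcond, if_neg hb]
      have hrhs : splitBgo u (c :: cs) ((l : Int) - r) =
          if ((l : Int) - r + (if c = '(' then 1 else -1)) = 0 then (u ++ [c], cs)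
          else splitBgo (u ++ [c]) cs ((l : Int) - r + (if c = '(' then 1 else -1)) := rfl
      rw [hrhs]
      by_cases hc : c = '('
      · rw [if_pos hc, if_pos hc, ih (l + 1) r (u ++ [c]) (by omega)]
        have h1 : ((l + 1 : Nat) : Int) - r = (l : Int) - r + 1 := by push_cast; ring
        rw [h1]
      · rw [if_neg hc, if_neg hc, ih l (r + 1) (u ++ [c]) (by omega)]
        have h1 : ((l : Nat) : Int) - ((r + 1 : Nat) : Int) = (l : Int) - r + -1 := by
          push_cast; ring
        rw [h1]

theorem split_eq (p : List Char) : splitA p 0 0 [] = splitB p := by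
  cases p with
  | nil => rfl
  | cons c cs =>
    have hrhs : splitB (c :: cs) =
        if ((0 : Int) + (if c = '(' then 1 else -1)) = 0 then ([c], cs)
        else splitBgo [c] cs ((0 : Int) + (if c = '(' then 1 else -1)) := rfl
    simp only [splitA]
    rw [if_neg (by simp), hrhs]
    by_cases hc : c = '('
    · rw [if_pos hc, if_pos hc, split_agree cs 1 0 ([] ++ [c]) (by omega)]
      norm_num
    · rw [if_neg hc, if_neg hc, split_agree cs 0 1 ([] ++ [c]) (by omega)]
      norm_num

theorem ok_agree : ∀ (cs : List Char) (bal : Int), ¬ bal < 0 →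
    rlA cs bal = okgo cs.dropLast bal := by
  intro cs
  induction cs with
  | nil => intro bal _; rfl
  | cons c cs ih =>
    intro bal h
    have hb : (if c = '(' then bal + 1 else bal - 1) = bal + (if c = '(' then (1 : Int) else -1) := by
      split <;> ring
    simp only [rlA]
    rw [if_neg h, hb]
    cases cs with
    | nil => rfl
    | cons d ds =>
      have hd : (c :: d :: ds).dropLast = c :: (d :: ds).dropLast := rfl
      rw [hd]
      have hok : okgo (c :: (d :: ds).dropLast) bal =
          if (bal + (if c = '(' then 1 else -1)) < 0 then false
          else okgo (d :: ds).dropLast (bal + (if c = '(' then 1 else -1)) := rfl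
      rw [hok]
      by_cases hneg : (bal + (if c = '(' then (1 : Int) else -1)) < 0
      · rw [if_pos hneg]
        simp only [rlA]
        rw [if_pos hneg]
      · rw [if_neg hneg]
        exact ih _ hneg

theorem flip_agree : ∀ (cs tu : List Char), flipA cs tu = tu ++ flipB cs := by
  intro cs
  induction cs with
  | nil => intro tu; simp [flipA, flipB]
  | cons c cs ih => intro tu; simp [flipA, flipB, ih]

theorem mid_nil (u : List Char) (h : ¬ u.length > 2) : (u.drop 1).dropLast = [] := by
  match u with
  | [] => rfl
  | [a] => rfl
  | [a, b] => rfl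
  | a :: b :: c :: t => simp at h

theorem tu_eq (u : List Char) :
    (if u.length > 2 then flipA ((u.drop 1).dropLast) [] else [])
      = flipB ((u.drop 1).dropLast) := by
  split
  · rw [flip_agree]; simp
  · rw [mid_nil u (by assumption)]; rfl

theorem loopB_cons (cur : List Char) (h : cur ≠ []) (lefts rights : List (List Char)) :
    loopB cur lefts rights =
      if okB (splitB cur).1 then
        loopB (splitB cur).2 (lefts ++ [(splitB cur).1]) (rights ++ [[]])
      else
        loopB (splitB cur).2 (lefts ++ [['(']])
          (rights ++ [')' :: flipB (((splitB cur).1.drop 1).dropLast)]) := by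
  rw [loopB]
  rw [dif_neg h]

theorem solA_cons (p : List Char) (h : p ≠ []) :
    solA p =
      if rlA (splitA p 0 0 []).1 0 then (splitA p 0 0 []).1 ++ solA (splitA p 0 0 []).2
      else
        '(' :: (solA (splitA p 0 0 []).2 ++ ')' ::
          (if (splitA p 0 0 []).1.length > 2 then
            flipA (((splitA p 0 0 []).1.drop 1).dropLast) [] else [])) := by
  rw [solA]
  rw [dif_neg h]

theorem loopB_nil (lefts rights : List (List Char)) :
    loopB [] lefts rights = lefts.flatten ++ rights.reverse.flatten := by
  rw [loopB]
  rw [dif_pos rfl]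

theorem loopB_eq : ∀ (n : Nat) (cur : List Char), cur.length ≤ n → ∀ (lefts rights : List (List Char)),
    loopB cur lefts rights = lefts.flatten ++ solA cur ++ rights.reverse.flatten := by
  intro n
  induction n with
  | zero =>
    intro cur h lefts rights
    have hc : cur = [] := List.length_eq_zero_iff.mp (Nat.le_zero.mp h)
    subst hc
    rw [loopB_nil, solA]
    simp
  | succ n ihn =>
    intro cur h lefts rights
    by_cases hnil : cur = []
    · subst hnil
      rw [loopB_nil, solA]
      simp
    · obtain ⟨c, cs, rfl⟩ := List.exists_cons_of_ne_nil hnil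
      have hA : splitA (c :: cs) 0 0 [] = splitB (c :: cs) := split_eq (c :: cs)
      have hok : rlA (splitB (c :: cs)).1 0 = okB (splitB (c :: cs)).1 :=
        ok_agree (splitB (c :: cs)).1 0 (by norm_num)
      have hlen : (splitB (c :: cs)).2.length ≤ n :=
        Nat.lt_succ_iff.mp (Nat.lt_of_lt_of_le (splitB_snd_lt c cs) h)
      rw [loopB_cons _ hnil, solA_cons _ hnil, hA, hok, tu_eq]
      by_cases hk : okB (splitB (c :: cs)).1 = true
      · rw [if_pos hk, if_pos hk, ihn _ hlen]
        simp [List.append_assoc]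
      · rw [if_neg hk, if_neg hk, ihn _ hlen]
        simp [List.append_assoc]

-- ===== VERDICT (by name: the statement is the Claim_ definition above) =====
theorem solution_spec : Claim_equal_solution := by
  intro p _
  show solution p = solution_alt p
  unfold solution solution_alt
  rw [loopB_eq p.toList.length p.toList le_rfl]
  simp
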